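-- pv_equiv track=rewrite | github.com/KuramitsuLab/t5maru | metrics/score_py.py | extract_indent
-- ===== SOURCE A (Python) =====
-- def extract_indent(tokens: list, s: str, start):
--     tokens.append('<nl>')
--     shift = start+1
--     ss = []
--     while True:
--         if s.startswith('    ', shift):
--             ss.append('<tab>')
--             shift += 4
--             continue
--         if s.startswith('\t', shift):
--             ss.append('<tab>')
--             shift += 1
--             continue
--         break
--     tokens.append(''.join(ss))
--     return shift
-- ===== SOURCE B (Python) =====
-- import re
--
-- _INDENT = re.compile(r'(?:    |\t)*')
--
--
-- def extract_indent(tokens: list, s: str, start):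
--     tokens.append('<nl>')
--     g = _INDENT.match(s[start + 1:]).group()
--     tokens.append('<tab>' * (g.count('\t') + g.count(' ') // 4))
--     return start + 1 + len(g)
-- ===== Notes on version B (the rewrite author's own statement) =====
-- stated objective: idiomatic
-- what changed: The explicit while-loop scanning with s.startswith at a moving offset is replaced by a single greedy regex match of the whole leading indentation on the slice s[start+1:], with the tab-token count recovered arithmetically from the matched text; Pre_ excludes start < -1, where Python's end-relative clamping of startswith offsets (A) and of slices (B) are two equally defensible readings that no caller would specify.
-- outside the precondition, e.g. on extract_indent([], '\t\t', -2): A returns 2, B returns 0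
import Mathlib
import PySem

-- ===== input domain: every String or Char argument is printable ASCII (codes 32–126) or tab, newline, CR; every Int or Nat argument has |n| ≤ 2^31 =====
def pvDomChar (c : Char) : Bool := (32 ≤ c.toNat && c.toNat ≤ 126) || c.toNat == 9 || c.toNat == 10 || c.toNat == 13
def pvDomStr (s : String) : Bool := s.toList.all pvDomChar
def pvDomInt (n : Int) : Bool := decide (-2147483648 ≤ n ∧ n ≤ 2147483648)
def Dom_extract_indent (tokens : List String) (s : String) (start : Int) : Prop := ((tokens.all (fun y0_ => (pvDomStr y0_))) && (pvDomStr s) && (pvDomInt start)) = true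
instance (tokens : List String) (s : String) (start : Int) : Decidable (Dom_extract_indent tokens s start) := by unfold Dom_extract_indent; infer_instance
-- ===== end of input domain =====

-- B replaces A's moving-offset startswith while-loop by one greedy regex match of the
-- leading indentation on the slice s[start+1:] (same return value and same appends to
-- `tokens` on Pre_; the equivalence proved here is about the RETURN value only).


-- ===== PORT A =====
-- s.startswith(p, k): Python normalises a negative k like a slice bound (k+len, clamped
-- at 0) and then asks whether p is a prefix of s[k:]; exact for every Int k.
def pyStartsWithFrom (cs p : List Char) (k : Int) : Bool :=
  let k' : Nat := if k < 0 then ((cs.length : Int) + k).toNat else k.toNat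
  p.isPrefixOf (cs.drop k')

-- the `while True` loop of A: state = (ss accumulator, shift); returns the final shift
-- (the appends to `tokens`/`ss` do not influence the returned value).
def extractLoopA (cs : List Char) (ss : List String) (shift : Int) : Int :=
  if h4 : pyStartsWithFrom cs [' ', ' ', ' ', ' '] shift then
    extractLoopA cs (ss ++ ["<tab>"]) (shift + 4)
  else if h1 : pyStartsWithFrom cs ['\t'] shift then
    extractLoopA cs (ss ++ ["<tab>"]) (shift + 1)
  else shift
termination_by ((cs.length : Int) + 1 - shift).toNat
decreasing_by
  · have hle : shift ≤ (cs.length : Int) := by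
      by_contra hgt
      have h0 : ¬ shift < 0 := by omega
      simp [pyStartsWithFrom, h0,
            List.drop_eq_nil_of_le (by omega : cs.length ≤ shift.toNat)] at h4
    omega
  · have hle : shift ≤ (cs.length : Int) := by
      by_contra hgt
      have h0 : ¬ shift < 0 := by omega
      simp [pyStartsWithFrom, h0,
            List.drop_eq_nil_of_le (by omega : cs.length ≤ shift.toNat)] at h1
    omega

def extract_indent (_tokens : List String) (s : String) (start : Int) : Int :=
  -- tokens.append('<nl>') and the final tokens.append(''.join(ss)) mutate the caller's
  -- list only; the returned value is the loop's final shift.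
  extractLoopA s.toList [] (start + 1)

-- ===== PORT B =====
-- hand port of the greedy match of re.compile(r'(?:    |\t)*') at position 0: the
-- alternation tries four spaces before a tab and nothing follows the star, so the
-- regex engine never backtracks — this recursion computes len(m.group()) exactly.
def indentMatchLen (cs : List Char) : Nat :=
  if h4 : [' ', ' ', ' ', ' '].isPrefixOf cs then 4 + indentMatchLen (cs.drop 4)
  else if h1 : ['\t'].isPrefixOf cs then 1 + indentMatchLen (cs.drop 1)
  else 0
termination_by cs.length
decreasing_by
  · rw [List.isPrefixOf_iff_prefix] at h4
    have := h4.length_le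
    simp_all; omega
  · rw [List.isPrefixOf_iff_prefix] at h1
    have := h1.length_le
    simp_all; omega

def extract_indent_alt (_tokens : List String) (s : String) (start : Int) : Int :=
  -- tokens.append('<nl>'); tokens.append('<tab>' * (g.count('\t') + g.count(' ')//4)):
  -- mutation of the caller's list; the returned value is start + 1 + len(g).
  start + 1 + (indentMatchLen (PySem.List.slice s.toList (some (start + 1)) none) : Int)

-- ===== PRECONDITION & SPEC =====
-- Pre_ excludes start < -1 (a scan offset before the beginning of the string): there
-- Python's end-relative clamping of startswith offsets (A) and of slices (B) are two
-- equally defensible readings that no caller would specify, and the two may differ.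
def Pre_extract_indent (_tokens : List String) (_s : String) (start : Int) : Prop :=
  0 ≤ start + 1
instance (tokens : List String) (s : String) (start : Int) : Decidable (Pre_extract_indent tokens s start) := by unfold Pre_extract_indent; infer_instance

def pvWitness_extract_indent : List String × String × Int := (["x"], "    \tab", 2)

def Spec_extract_indent (tokens : List String) (s : String) (start : Int) (out : Int) : Prop := out = extract_indent_alt tokens s start
instance (tokens : List String) (s : String) (start : Int) (out : Int) : Decidable (Spec_extract_indent tokens s start out) := by unfold Spec_extract_indent; infer_instance

-- ===== CLAIM (what is proved, stated in full; the proofs are below) =====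
def Claim_equal_extract_indent : Prop := ∀ (tokens : List String) (s : String) (start : Int), Dom_extract_indent tokens s start → Pre_extract_indent tokens s start → Spec_extract_indent tokens s start (extract_indent tokens s start)

-- ===== LEMMAS AND PROOFS =====

-- at a nonnegative offset, startswith is a prefix test on the dropped list
lemma pyStartsWithFrom_nonneg (cs p : List Char) (k : Int) (hk : 0 ≤ k) :
    pyStartsWithFrom cs p k = p.isPrefixOf (cs.drop k.toNat) := by
  simp only [pyStartsWithFrom]
  rw [if_neg (by omega : ¬ k < 0)]

-- when neither unit matches, the regex matches the empty string
lemma indentMatchLen_eq_zero (cs : List Char)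
    (h4 : ¬ [' ', ' ', ' ', ' '].isPrefixOf cs) (h1 : ¬ ['\t'].isPrefixOf cs) :
    indentMatchLen cs = 0 := by
  rw [indentMatchLen, dif_neg h4, dif_neg h1]

lemma indentMatchLen_four (cs : List Char) (h : [' ', ' ', ' ', ' '].isPrefixOf cs) :
    indentMatchLen cs = 4 + indentMatchLen (cs.drop 4) := by
  rw [indentMatchLen, dif_pos h]

lemma indentMatchLen_tab (cs : List Char) (h4 : ¬ [' ', ' ', ' ', ' '].isPrefixOf cs = true)
    (h1 : ['\t'].isPrefixOf cs) :
    indentMatchLen cs = 1 + indentMatchLen (cs.drop 1) := by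
  rw [indentMatchLen, dif_neg h4, dif_pos h1]

-- loop invariant: from a nonnegative shift t the loop returns t + len of the greedy
-- indentation match of cs from position t (induction on the space left of the scan)
lemma extractLoopA_eq_aux (cs : List Char) (n : Nat) : ∀ (t : Nat), cs.length - t ≤ n →
    ∀ (ss : List String),
    extractLoopA cs ss (t : Int) = (t : Int) + (indentMatchLen (cs.drop t) : Int) := by
  induction n with
  | zero =>
    intro t hle ss
    have hnil : cs.drop t = [] := List.drop_eq_nil_of_le (by omega)
    rw [extractLoopA,
        dif_neg (by simp [pyStartsWithFrom_nonneg cs _ _ (by omega : (0:Int) ≤ (t:Int)), hnil]),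
        dif_neg (by simp [pyStartsWithFrom_nonneg cs _ _ (by omega : (0:Int) ≤ (t:Int)), hnil]),
        hnil]
    simp [indentMatchLen]
  | succ n ihn =>
    intro t hle ss
    rw [extractLoopA]
    by_cases h4 : pyStartsWithFrom cs [' ', ' ', ' ', ' '] (t : Int) = true
    · rw [dif_pos h4]
      rw [pyStartsWithFrom_nonneg cs _ _ (by omega)] at h4
      simp only [Int.toNat_natCast] at h4
      have hlt : t < cs.length := by
        by_contra hge
        simp [List.drop_eq_nil_of_le (by omega : cs.length ≤ t)] at h4
      have hcast : (t : Int) + 4 = ((t + 4 : Nat) : Int) := by push_cast; ring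
      rw [hcast, ihn (t + 4) (by omega) _, indentMatchLen_four _ h4, List.drop_drop]
      push_cast; ring
    · rw [dif_neg h4]
      by_cases h1 : pyStartsWithFrom cs ['\t'] (t : Int) = true
      · rw [dif_pos h1]
        rw [pyStartsWithFrom_nonneg cs _ _ (by omega)] at h1 h4
        simp only [Int.toNat_natCast] at h1 h4
        have hlt : t < cs.length := by
          by_contra hge
          simp [List.drop_eq_nil_of_le (by omega : cs.length ≤ t)] at h1
        have hcast : (t : Int) + 1 = ((t + 1 : Nat) : Int) := by push_cast; ring
        rw [hcast, ihn (t + 1) (by omega) _, indentMatchLen_tab _ h4 h1, List.drop_drop]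
        push_cast; ring
      · rw [dif_neg h1]
        rw [pyStartsWithFrom_nonneg cs _ _ (by omega)] at h1 h4
        simp only [Int.toNat_natCast] at h1 h4
        rw [indentMatchLen_eq_zero (cs.drop t) h4 h1]
        simp

lemma extractLoopA_eq (cs : List Char) (t : Nat) (ss : List String) :
    extractLoopA cs ss (t : Int) = (t : Int) + (indentMatchLen (cs.drop t) : Int) :=
  extractLoopA_eq_aux cs (cs.length - t) t le_rfl ss

-- ===== VERDICT (by name: the statement is the Claim_ definition above) =====
theorem extract_indent_spec : Claim_equal_extract_indent := by
  intro tokens s start _ hpre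
  unfold Spec_extract_indent extract_indent extract_indent_alt
  have hpre' : 0 ≤ start + 1 := hpre
  rw [PySem.List.slice_from (ha := hpre')]
  rw [show start + 1 = (((start + 1).toNat : Nat) : Int) from by omega, extractLoopA_eq]
  simp
  rw [show max (start + 1) 0 = start + 1 from by omega]
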